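-- pv_equiv track=rewrite | github.com/fyk943749465/LLeetCode | leetcode2200/leetcode2154.py | findFinalValue
-- ===== SOURCE A (Python) =====
-- from typing import List
--
-- def findFinalValue(nums: List[int], original: int) -> int:
--
--     num_hash = {}
--     for i, v in enumerate(nums):
--         if v not in num_hash:
--             num_hash[v] = 1
--
--     while original in num_hash:
--         original *= 2
--     return original
-- ===== SOURCE B (Python) =====
-- from typing import List
--
-- def findFinalValue(nums: List[int], original: int) -> int:
--     for x in sorted(nums, key=abs):
--         if x == original:
--             original *= 2
--     return original
-- ===== Notes on version B (the rewrite author's own statement) =====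
-- stated objective: simpler
-- what changed: Replaced the hash-set build plus separate doubling while-loop with a single equality-driven pass over the list sorted by absolute value (the chain of doubled targets is strictly increasing in absolute value, so each reachable target is met in order).
import Mathlib
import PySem

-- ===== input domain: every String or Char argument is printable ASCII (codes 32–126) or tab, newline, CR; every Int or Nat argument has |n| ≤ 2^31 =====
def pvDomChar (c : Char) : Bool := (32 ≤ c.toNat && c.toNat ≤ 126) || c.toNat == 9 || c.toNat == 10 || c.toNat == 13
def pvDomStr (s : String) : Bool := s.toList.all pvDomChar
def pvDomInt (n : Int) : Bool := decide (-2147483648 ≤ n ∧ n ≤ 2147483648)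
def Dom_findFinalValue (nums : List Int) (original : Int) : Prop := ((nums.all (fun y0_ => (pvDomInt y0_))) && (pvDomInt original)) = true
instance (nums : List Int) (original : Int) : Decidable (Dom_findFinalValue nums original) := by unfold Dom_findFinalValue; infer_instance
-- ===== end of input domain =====

-- B replaces A's hash-set + separate doubling while-loop by one equality-driven pass over
-- the list sorted by absolute value (objective: simpler; same behaviour on Pre_).

-- ===== PORT A =====
-- the 'while original in num_hash: original *= 2' loop; fuel makes it total — under
-- Pre_ the loop exits within nums.length+1 iterations (chain values are distinct)
def loopA (d : PySem.Dict Int Int) : Nat → Int → Int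
  | 0, o => o
  | n+1, o => if d.contains o then loopA d n (o*2) else o

def findFinalValue (nums : List Int) (original : Int) : Int :=
  let num_hash := (PySem.List.enumerate nums).foldl
    (fun d p => if d.contains p.2 then d else d.insert p.2 (1 : Int)) PySem.Dict.empty
  loopA num_hash (nums.length + 1) original

-- ===== PORT B =====
def findFinalValue_alt (nums : List Int) (original : Int) : Int :=
  (PySem.List.sorted nums (fun x => |x|) false).foldl
    (fun o x => if x = o then o*2 else o) original

-- ===== PRECONDITION & SPEC =====
-- Pre_ excludes exactly the inputs where Python A never returns: original = 0 with 0 in nums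
-- makes 'while original in num_hash: original *= 2' loop forever (0*2 = 0).
def Pre_findFinalValue (nums : List Int) (original : Int) : Prop :=
  ¬ (original = 0 ∧ (0 : Int) ∈ nums)
instance (nums : List Int) (original : Int) : Decidable (Pre_findFinalValue nums original) := by
  unfold Pre_findFinalValue; infer_instance

def pvWitness_findFinalValue : List Int × Int := ([4, 2, 8, -3], 2)

def Spec_findFinalValue (nums : List Int) (original : Int) (out : Int) : Prop :=
  out = findFinalValue_alt nums original
instance (nums : List Int) (original : Int) (out : Int) : Decidable (Spec_findFinalValue nums original out) := by
  unfold Spec_findFinalValue; infer_instance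

-- ===== CLAIM (what is proved, stated in full; the proofs are below) =====
def Claim_equal_findFinalValue : Prop := ∀ (nums : List Int) (original : Int), Dom_findFinalValue nums original → Pre_findFinalValue nums original → Spec_findFinalValue nums original (findFinalValue nums original)

-- ===== LEMMAS AND PROOFS =====

-- reference loop: 'while o in l: o *= 2' with fuel, membership taken on a plain list
def chase (l : List Int) : Nat → Int → Int
  | 0, o => o
  | n+1, o => if o ∈ l then chase l n (o*2) else o

-- membership in A's dict after the building fold = membership in the list of values
theorem contains_foldl_dedup (e : List (Int × Int)) (d : PySem.Dict Int Int) (v : Int) :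
    ((e.foldl (fun d p => if d.contains p.2 then d else d.insert p.2 (1 : Int)) d).contains v = true)
      ↔ (d.contains v = true ∨ v ∈ e.map (·.2)) := by
  induction e generalizing d with
  | nil => simp
  | cons p t ih =>
    simp only [List.foldl_cons, List.map_cons, List.mem_cons]
    by_cases h : d.contains p.2 = true
    · rw [if_pos h, ih]
      constructor
      · rintro (hd | hm)
        · exact Or.inl hd
        · exact Or.inr (Or.inr hm)
      · rintro (hd | he | hm)
        · exact Or.inl hd
        · exact Or.inl (he ▸ h)
        · exact Or.inr hm
    · rw [if_neg h, ih]
      simp [PySem.Dict.contains_insert]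
      tauto

theorem loopA_eq_chase (d : PySem.Dict Int Int) (l : List Int)
    (h : ∀ v, d.contains v = true ↔ v ∈ l) :
    ∀ (f : Nat) (o : Int), loopA d f o = chase l f o := by
  intro f
  induction f with
  | zero => intro o; rfl
  | succ n ih =>
    intro o
    simp only [loopA, chase]
    by_cases ho : o ∈ l
    · rw [if_pos ((h o).mpr ho), if_pos ho, ih]
    · rw [if_neg (fun hc => ho ((h o).mp hc)), if_neg ho]

theorem chase_congr (l l' : List Int) (h : ∀ v, v ∈ l ↔ v ∈ l') :
    ∀ (f : Nat) (o : Int), chase l f o = chase l' f o := by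
  intro f
  induction f with
  | zero => intro o; rfl
  | succ n ih =>
    intro o
    simp only [chase]
    by_cases ho : o ∈ l
    · rw [if_pos ho, if_pos ((h o).mp ho), ih]
    · rw [if_neg ho, if_neg (fun hc => ho ((h o).mpr hc))]

-- fuel irrelevance: once some chain value escapes the list within both fuels, result is stable
theorem chase_stable (l : List Int) :
    ∀ (k : Nat) (o : Int) (f1 f2 : Nat), k < f1 → k < f2 → o * 2^k ∉ l →
      chase l f1 o = chase l f2 o := by
  intro k
  induction k with
  | zero =>
    intro o f1 f2 h1 h2 hnot
    cases f1 with
    | zero => omega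
    | succ a =>
      cases f2 with
      | zero => omega
      | succ b =>
        simp only [pow_zero, mul_one] at hnot
        simp [chase, hnot]
  | succ k ih =>
    intro o f1 f2 h1 h2 hnot
    cases f1 with
    | zero => omega
    | succ a =>
      cases f2 with
      | zero => omega
      | succ b =>
        by_cases ho : o ∈ l
        · simp only [chase, if_pos ho]
          have hpow : (o*2) * 2^k = o * 2^(k+1) := by ring
          exact ih (o*2) a b (by omega) (by omega) (by rw [hpow]; exact hnot)
        · simp [chase, ho]

-- pigeonhole: for o ≠ 0 the values o·2^k are pairwise distinct, so they cannot all lie in l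
theorem chain_escape (l : List Int) (o : Int) (ho : o ≠ 0)
    (h : ∀ k ≤ l.length, o * 2^k ∈ l) : False := by
  have hinj : ∀ a b : Nat, o * 2^a = o * 2^b → a = b := by
    intro a b hab
    have h2 : (2:Int)^a = 2^b := mul_left_cancel₀ ho hab
    have : ((2^a : Nat) : Int) = ((2^b : Nat) : Int) := by push_cast; exact h2
    have := Nat.cast_injective this
    exact Nat.pow_right_injective (le_refl 2) this
  set n := l.length with hn
  have hsub : (Finset.range (n+1)).image (fun k => o * 2^k) ⊆ l.toFinset := by
    intro x hx
    simp only [Finset.mem_image, Finset.mem_range] at hx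
    obtain ⟨k, hk, rfl⟩ := hx
    exact List.mem_toFinset.mpr (h k (Nat.lt_succ_iff.mp hk))
  have hcard : ((Finset.range (n+1)).image (fun k => o * 2^k)).card = n+1 := by
    rw [Finset.card_image_of_injOn (fun a _ b _ hab => hinj a b hab), Finset.card_range]
  have := Finset.card_le_card hsub
  rw [hcard] at this
  have hle : l.toFinset.card ≤ n := hn ▸ l.toFinset_card_le
  omega

theorem chain_escape_exists (l : List Int) (o : Int) (ho : o ≠ 0) :
    ∃ k ≤ l.length, o * 2^k ∉ l := by
  by_contra hc
  push Not at hc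
  exact chain_escape l o ho hc

-- main invariant: the fold over the abs-sorted suffix s computes the while-loop over p ++ s
theorem fold_eq_chase (s p : List Int) (o : Int)
    (hsort : (p ++ s).Pairwise (fun a b => |a| ≤ |b|)) (ho : o ≠ 0) (hop : o ∉ p) :
    s.foldl (fun o x => if x = o then o*2 else o) o
      = chase (p ++ s) ((p ++ s).length + 1) o := by
  induction s generalizing p o with
  | nil =>
    simp only [List.foldl_nil, List.append_nil] at *
    obtain ⟨a, ha⟩ : ∃ a, p.length + 1 = a + 1 := ⟨p.length, rfl⟩
    rw [ha]
    simp [chase, hop]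
  | cons x t ih =>
    have hassoc : p ++ x :: t = (p ++ [x]) ++ t := by simp
    have hple : ∀ y ∈ p, |y| ≤ |x| := by
      intro y hy
      have := (List.pairwise_append.mp hsort).2.2
      exact this y hy x (List.mem_cons_self)
    simp only [List.foldl_cons]
    by_cases hx : x = o
    · rw [if_pos hx]
      have ho2 : o * 2 ≠ 0 := by
        intro h; exact ho (by omega)
      have hop2 : o * 2 ∉ p ++ [x] := by
        intro hmem
        have habs : |o| < |o*2| := by
          rw [abs_mul]
          have : (0:Int) < |o| := abs_pos.mpr ho
          simp only [abs_two]; omega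
        rcases List.mem_append.mp hmem with hp | hx'
        · have := hple _ hp
          rw [hx] at this; omega
        · have : o * 2 = x := List.mem_singleton.mp hx'
          rw [hx] at this; omega
      have := ih (p ++ [x]) (o*2) (hassoc ▸ hsort) ho2 hop2
      rw [this, ← hassoc]
      have hmemo : o ∈ p ++ x :: t := by
        rw [hx] at *; exact List.mem_append.mpr (Or.inr List.mem_cons_self)
      -- unfold one step of chase on the RHS and restore fuel by stability
      have hstep : chase (p ++ x :: t) ((p ++ x :: t).length + 1) o
          = chase (p ++ x :: t) ((p ++ x :: t).length) (o*2) := by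
        obtain ⟨m, hm⟩ : ∃ m, (p ++ x :: t).length = m + 1 := by
          refine ⟨(p ++ t).length, ?_⟩; simp; omega
        rw [hm]; simp [chase, hmemo]
      rw [hstep]
      -- need an escape index k < (p ++ x :: t).length for o*2
      obtain ⟨k, hk, hkn⟩ := chain_escape_exists (p ++ x :: t) o ho
      have hk0 : k ≠ 0 := by
        intro h0; rw [h0, pow_zero, mul_one] at hkn; exact hkn hmemo
      obtain ⟨j, rfl⟩ := Nat.exists_eq_succ_of_ne_zero hk0
      have hesc : (o*2) * 2^j ∉ p ++ x :: t := by
        have : (o*2) * 2^j = o * 2^(j+1) := by ring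
        rw [this]; exact hkn
      exact chase_stable (p ++ x :: t) j (o*2) ((p ++ x :: t).length + 1)
        ((p ++ x :: t).length) (by omega) (by omega) hesc
    · rw [if_neg hx]
      have hop' : o ∉ p ++ [x] := by
        intro hmem
        rcases List.mem_append.mp hmem with hp | hx'
        · exact hop hp
        · exact hx (List.mem_singleton.mp hx').symm
      have := ih (p ++ [x]) o (hassoc ▸ hsort) ho hop'
      rw [this, ← hassoc]

theorem fold_zero_of_not_mem (s : List Int) (h : (0:Int) ∉ s) :
    s.foldl (fun o x => if x = o then o*2 else o) 0 = 0 := by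
  induction s with
  | nil => rfl
  | cons x t ih =>
    simp only [List.foldl_cons]
    rw [if_neg (fun hx => h (by rw [← hx]; exact List.mem_cons_self)),
        ih (fun hm => h (List.mem_cons_of_mem _ hm))]

theorem contains_numhash (nums : List Int) (v : Int) :
    (((PySem.List.enumerate nums).foldl
        (fun d p => if d.contains p.2 then d else d.insert p.2 (1 : Int))
        PySem.Dict.empty).contains v = true) ↔ v ∈ nums := by
  rw [contains_foldl_dedup]
  simp [PySem.List.map_snd_enumerate]

-- ===== VERDICT (by name: the statement is the Claim_ definition above) =====
theorem findFinalValue_spec : Claim_equal_findFinalValue := by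
  intro nums original _hdom hpre
  unfold Spec_findFinalValue findFinalValue findFinalValue_alt
  simp only []
  by_cases ho : original = 0
  · subst ho
    have h0 : (0:Int) ∉ nums := fun hm => hpre ⟨rfl, hm⟩
    rw [loopA_eq_chase _ nums (contains_numhash nums)]
    obtain ⟨a, ha⟩ : ∃ a, nums.length + 1 = a + 1 := ⟨nums.length, rfl⟩
    rw [ha]
    simp only [chase, if_neg h0]
    rw [fold_zero_of_not_mem _ (fun hm =>
      h0 ((PySem.List.mem_sorted nums (fun x => |x|) false 0).mp hm))]
  · rw [loopA_eq_chase _ nums (contains_numhash nums)]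
    have hsort := PySem.List.sorted_pairwise (xs := nums) (key := fun x => |x|)
    have := fold_eq_chase (PySem.List.sorted nums (fun x => |x|) false) [] original
      (by simpa using hsort) ho (by simp)
    simp only [List.nil_append] at this
    rw [this]
    rw [chase_congr _ nums (fun v => PySem.List.mem_sorted nums (fun x => |x|) false v),
        PySem.List.length_sorted]
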